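-- pv_equiv track=rewrite | github.com/djjchambers/personalcode | coderbyte/VowelSquare.py | VowelSquare
-- ===== SOURCE A (Python) =====
-- def VowelSquare(terms):
--     strArr = [x for x in terms]
--     vowels = 'aeiou'
--     R = len(strArr)
--     C = len(strArr[0])
--
--     L = []
--
--     for i in range(R - 1):
--         for j in range(C - 1):
--             if strArr[i][j] in vowels and strArr[i+1][j] in vowels and strArr[i+1][j+1] in vowels and strArr[i][j+1] in vowels:
--                 L.append((i, j))
--     if L == []:
--         return 'not found'
--     else:
--         res = (sorted(L, key=lambda x: x[1]))
--         return ''.join(str(res[0][0])+'-'+(str(res[0][1])))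
-- ===== SOURCE B (Python) =====
-- def VowelSquare(terms):
--     vowels = 'aeiou'
--     R = len(terms)
--     C = len(terms[0])
--     for j in range(C - 1):
--         for i in range(R - 1):
--             if terms[i][j] in vowels and terms[i+1][j] in vowels and terms[i][j+1] in vowels and terms[i+1][j+1] in vowels:
--                 return str(i) + '-' + str(j)
--     return 'not found'
-- ===== Notes on version B (the rewrite author's own statement) =====
-- stated objective: simpler
-- what changed: B drops A's intermediate list L and the stable sort entirely: it scans columns in the outer loop and rows in the inner loop and returns at the first all-vowel 2x2 square (exactly the smallest-column/smallest-row position A extracts as the head of its stable sort), so it exits early and never builds or sorts a hit list.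
-- outside the precondition, e.g. on VowelSquare(['bb', 'b']): A returns 'not found', B returns 'not found'; on VowelSquare(['ab', 'a']): A raises IndexError, B returns 'not found'
import Mathlib
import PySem

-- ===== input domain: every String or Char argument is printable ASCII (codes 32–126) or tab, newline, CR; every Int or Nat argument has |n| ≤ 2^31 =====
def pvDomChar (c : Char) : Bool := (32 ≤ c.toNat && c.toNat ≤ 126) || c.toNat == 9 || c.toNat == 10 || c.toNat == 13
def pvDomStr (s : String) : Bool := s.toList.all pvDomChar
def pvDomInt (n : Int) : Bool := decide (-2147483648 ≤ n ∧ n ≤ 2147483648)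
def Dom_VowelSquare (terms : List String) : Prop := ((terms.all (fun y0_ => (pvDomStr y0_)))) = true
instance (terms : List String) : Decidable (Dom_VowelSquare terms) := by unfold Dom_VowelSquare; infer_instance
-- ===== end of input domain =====

-- B replaces A's collect-all-hits list and stable sort by a column-outer/row-inner scan
-- that returns at the first all-vowel 2x2 square (objective: simpler).

-- ===== PORT A =====
-- 'strArr[i][j] in vowels' for the 1-character string strArr[i][j]: character membership
-- in "aeiou" (exact for single characters); out-of-range access (Python IndexError) is
-- excluded by Pre_ and rendered as false here.
def pvCell (strArr : List String) (i j : Int) : Bool :=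
  match PySem.List.pyGet? strArr i with
  | some s =>
    match PySem.Str.pyGet? s j with
    | some c => ("aeiou".toList).contains c
    | none => false
  | none => false

def VowelSquare (terms : List String) : String :=
  let strArr := terms.map (fun x => x)
  let R : Int := strArr.length
  -- len(strArr[0]): IndexError on the empty list, excluded by Pre_
  let C : Int := match PySem.List.pyGet? strArr 0 with
                 | some s => (s.toList.length : Int)
                 | none => 0
  let L : List (Int × Int) :=
    (PySem.List.pyRange 0 (R - 1) 1).foldl (fun acc i =>
      (PySem.List.pyRange 0 (C - 1) 1).foldl (fun acc j =>
        if pvCell strArr i j && pvCell strArr (i+1) j && pvCell strArr (i+1) (j+1)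
             && pvCell strArr i (j+1)
        then acc ++ [(i, j)] else acc) acc) []
  if L = [] then "not found"
  else
    let res := PySem.List.sorted L (fun x => x.2)
    PySem.Int.toStr (PySem.List.pyGetD res 0 (0, 0)).1 ++ "-"
      ++ PySem.Int.toStr (PySem.List.pyGetD res 0 (0, 0)).2

-- ===== PORT B =====
def VowelSquare_alt (terms : List String) : String :=
  let R : Int := terms.length
  let C : Int := match PySem.List.pyGet? terms 0 with
                 | some s => (s.toList.length : Int)
                 | none => 0
  -- early-returning nested for-loops, column j outer, row i inner
  match (PySem.List.pyRange 0 (C - 1) 1).findSome? (fun j =>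
          (PySem.List.pyRange 0 (R - 1) 1).findSome? (fun i =>
            if pvCell terms i j && pvCell terms (i+1) j && pvCell terms i (j+1)
                 && pvCell terms (i+1) (j+1)
            then some (PySem.Int.toStr i ++ "-" ++ PySem.Int.toStr j) else none)) with
  | some s => s
  | none => "not found"

-- ===== PRECONDITION & SPEC =====
-- Pre_ excludes the empty list (A's len(strArr[0]) raises IndexError) and ragged lists in
-- which some row is shorter than the first row: there A's grid accesses can raise
-- IndexError depending on where the vowels sit (short-circuit evaluation), so its value,
-- when it returns one, is an accident of evaluation order.
def Pre_VowelSquare (terms : List String) : Prop :=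
  terms ≠ [] ∧ ∀ s ∈ terms, (terms.headD "").toList.length ≤ s.toList.length
instance (terms : List String) : Decidable (Pre_VowelSquare terms) := by
  unfold Pre_VowelSquare; infer_instance

def pvWitness_VowelSquare : List String := ["aaxe", "aaie", "bboo"]

def Spec_VowelSquare (terms : List String) (out : String) : Prop := out = VowelSquare_alt terms
instance (terms : List String) (out : String) : Decidable (Spec_VowelSquare terms out) := by
  unfold Spec_VowelSquare; infer_instance

-- ===== CLAIM (what is proved, stated in full; the proofs are below) =====
def Claim_equal_VowelSquare : Prop := ∀ (terms : List String), Dom_VowelSquare terms → Pre_VowelSquare terms → Spec_VowelSquare terms (VowelSquare terms)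

-- ===== LEMMAS AND PROOFS =====

-- first-minimum fold: the element Python's stable sort puts first
def pvStep {A : Type} (key : A -> Int) (acc : Option A) (x : A) : Option A :=
  match acc with
  | none => some x
  | some m => if key x < key m then some x else some m

theorem pvStep_some {A : Type} (key : A -> Int) :
    ∀ (t : List A) (a : A), ∃ b, t.foldl (pvStep key) (some a) = some b := by
  intro t
  induction t with
  | nil => intro a; exact ⟨a, rfl⟩
  | cons y t ih =>
    intro a
    simp only [List.foldl_cons]
    rcases lt_or_ge (key y) (key a) with hlt | hge
    · have hs : pvStep key (some a) y = some y := by simp [pvStep, hlt]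
      rw [hs]; exact ih _
    · have hs : pvStep key (some a) y = some a := by simp [pvStep, not_lt.mpr hge]
      rw [hs]; exact ih _

theorem pv_foldl_none {A : Type} (key : A -> Int) (xs : List A)
    (h : xs.foldl (pvStep key) none = none) : xs = [] := by
  cases xs with
  | nil => rfl
  | cons y t =>
    exfalso
    obtain ⟨b, hb⟩ := pvStep_some key t y
    simp only [List.foldl_cons] at h
    have hs : pvStep key none y = some y := rfl
    rw [hs, hb] at h
    simp at h

theorem pv_foldl_some {A : Type} (key : A -> Int) (xs : List A) (hne : xs ≠ []) :
    ∃ m, xs.foldl (pvStep key) none = some m := by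
  cases xs with
  | nil => exact absurd rfl hne
  | cons y t =>
    simp only [List.foldl_cons]
    have hs : pvStep key none y = some y := rfl
    rw [hs]
    exact pvStep_some key t y

theorem pv_head_sorted {A : Type} (key : A -> Int) (xs : List A) :
    (PySem.List.sorted xs key).head? = xs.foldl (pvStep key) none := by
  induction xs using List.reverseRecOn with
  | nil => rfl
  | append_singleton xs x ih =>
    have hins : PySem.List.sorted (xs ++ [x]) key
        = PySem.List.insertBy (fun a b => decide (key a < key b)) x (PySem.List.sorted xs key) := by
      rw [PySem.List.sorted_eq_foldl_insertBy, PySem.List.sorted_eq_foldl_insertBy,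
        List.foldl_append]
      rfl
    rw [hins, List.foldl_append]
    cases hsx : PySem.List.sorted xs key with
    | nil =>
      rw [hsx] at ih
      simp only [List.head?_nil] at ih
      rw [← ih]
      rfl
    | cons m tl =>
      rw [hsx] at ih
      simp only [List.head?_cons] at ih
      rw [← ih]
      show (PySem.List.insertBy (fun a b => decide (key a < key b)) x (m :: tl)).head?
        = pvStep key (some m) x
      unfold PySem.List.insertBy pvStep
      split <;> simp_all

theorem pv_firstMin_decomp {A : Type} (key : A -> Int) :
    ∀ (xs : List A) (m : A), xs.foldl (pvStep key) none = some m ->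
      ∃ L1 L2, xs = L1 ++ m :: L2 ∧ (∀ x ∈ L1, key m < key x)
        ∧ (∀ x ∈ L2, key m ≤ key x) := by
  intro xs
  induction xs using List.reverseRecOn with
  | nil => intro m h; exact absurd h (by simp)
  | append_singleton xs x ih =>
    intro m h
    rw [List.foldl_append] at h
    cases hfx : xs.foldl (pvStep key) none with
    | none =>
      have hxs := pv_foldl_none key xs hfx
      rw [hfx] at h
      have hmx : m = x := by
        simp only [List.foldl_cons, List.foldl_nil] at h
        have hs : pvStep key none x = some x := rfl
        rw [hs] at h
        exact (Option.some.inj h).symm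
      refine ⟨[], [], ?_, by simp, by simp⟩
      simp [hxs, hmx]
    | some m0 =>
      rw [hfx] at h
      obtain ⟨L1, L2, hdec, h1, h2⟩ := ih m0 hfx
      simp only [List.foldl_cons, List.foldl_nil] at h
      by_cases hlt : key x < key m0
      · have hmx : m = x := by
          have hs : pvStep key (some m0) x = some x := by simp [pvStep, hlt]
          rw [hs] at h
          exact (Option.some.inj h).symm
        subst hmx
        refine ⟨xs, [], by simp, ?_, by simp⟩
        intro y hy
        rw [hdec] at hy
        rcases List.mem_append.mp hy with hy1 | hy2
        · exact lt_trans hlt (h1 y hy1)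
        · rcases List.mem_cons.mp hy2 with rfl | hy2'
          · exact hlt
          · exact lt_of_lt_of_le hlt (h2 y hy2')
      · have hmm : m = m0 := by
          have hs : pvStep key (some m0) x = some m0 := by simp [pvStep, hlt]
          rw [hs] at h
          exact (Option.some.inj h).symm
        subst hmm
        refine ⟨L1, L2 ++ [x], by rw [hdec]; simp, h1, ?_⟩
        intro y hy
        rcases List.mem_append.mp hy with hy1 | hy2
        · exact h2 y hy1
        · rcases List.mem_singleton.mp hy2 with rfl
          exact le_of_not_gt hlt

theorem pv_findSome?_range {B : Type} (f : Nat -> Option B) (v : B) :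
    ∀ (n j : Nat), j < n -> (∀ k, k < j -> f k = none) -> f j = some v ->
      (List.range n).findSome? f = some v := by
  intro n
  induction n with
  | zero => intro j hj _ _; omega
  | succ n ih =>
    intro j hj hnone hsome
    rw [List.range_succ, List.findSome?_append]
    rcases Nat.lt_or_ge j n with hlt | hge
    · rw [ih j hlt hnone hsome]; rfl
    · have hjn : j = n := by omega
      subst hjn
      have hn : (List.range j).findSome? f = none := by
        rw [List.findSome?_eq_none_iff]
        intro k hk
        exact hnone k (List.mem_range.mp hk)
      rw [hn]
      simpa using hsome

-- the 2x2 all-vowel test at natural coordinates, in A's evaluation order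
def pvHit (terms : List String) (i j : Nat) : Bool :=
  pvCell terms (i : Int) (j : Int) && pvCell terms ((i : Int) + 1) (j : Int)
    && pvCell terms ((i : Int) + 1) ((j : Int) + 1) && pvCell terms (i : Int) ((j : Int) + 1)

-- A's list L in row-major closed form
def pvL (terms : List String) (R' C' : Nat) : List (Int × Int) :=
  (List.range R').flatMap (fun i =>
    ((List.range C').filter (fun j => pvHit terms i j)).map
      (fun (j : Nat) => ((i : Int), (j : Int))))

theorem pv_hitB_eq (terms : List String) (i j : Nat) :
    (pvCell terms (i : Int) (j : Int) && pvCell terms ((i : Int) + 1) (j : Int)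
      && pvCell terms (i : Int) ((j : Int) + 1) && pvCell terms ((i : Int) + 1) ((j : Int) + 1))
    = pvHit terms i j := by
  unfold pvHit
  cases pvCell terms (i : Int) (j : Int) <;>
    cases pvCell terms ((i : Int) + 1) (j : Int) <;>
      cases pvCell terms (i : Int) ((j : Int) + 1) <;>
        cases pvCell terms ((i : Int) + 1) ((j : Int) + 1) <;> rfl

theorem pv_L_eq (terms : List String) (R' C' : Nat) :
    ((PySem.List.pyRange 0 (R' : Int) 1).foldl (fun acc i =>
      (PySem.List.pyRange 0 (C' : Int) 1).foldl (fun acc j =>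
        if pvCell terms i j && pvCell terms (i+1) j && pvCell terms (i+1) (j+1)
             && pvCell terms i (j+1)
        then acc ++ [(i, j)] else acc) acc) [])
    = pvL terms R' C' := by
  rw [PySem.List.pyRange_zero_natCast R', PySem.List.pyRange_zero_natCast C', List.foldl_map]
  have h1 : ∀ (acc : List (Int × Int)), ∀ i ∈ List.range R',
      ((List.range C').map (fun (k : Nat) => (k : Int))).foldl (fun acc j =>
        if pvCell terms (i : Int) j && pvCell terms ((i : Int)+1) j
             && pvCell terms ((i : Int)+1) (j+1) && pvCell terms (i : Int) (j+1)
        then acc ++ [((i : Int), j)] else acc) acc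
      = acc ++ ((List.range C').filter (fun j => pvHit terms i j)).map
          (fun (j : Nat) => ((i : Int), (j : Int))) := by
    intro acc i _
    rw [List.foldl_map]
    exact PySem.List.foldl_append_if (fun j => pvHit terms i j)
      (fun (j : Nat) => ((i : Int), (j : Int))) (List.range C') acc
  refine Eq.trans (PySem.List.foldl_congr_mem _ _ _ _ h1) ?_
  rw [PySem.List.foldl_append_eq_flatMap]
  rfl

theorem pv_mem_pvL (terms : List String) (R' C' : Nat) (x : Int × Int) :
    x ∈ pvL terms R' C' ↔
      ∃ i j, i < R' ∧ j < C' ∧ pvHit terms i j = true ∧ x = ((i : Int), (j : Int)) := by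
  unfold pvL
  simp only [List.mem_flatMap, List.mem_map, List.mem_filter, List.mem_range]
  constructor
  · rintro ⟨i, hi, j, ⟨hj, hhit⟩, rfl⟩
    exact ⟨i, j, hi, hj, hhit, rfl⟩
  · rintro ⟨i, j, hi, hj, hhit, rfl⟩
    exact ⟨i, hi, j, ⟨hj, hhit⟩, rfl⟩

theorem pv_pairwise_pvL (terms : List String) (R' C' : Nat) :
    (pvL terms R' C').Pairwise
      (fun a b : Int × Int => a.1 < b.1 ∨ (a.1 = b.1 ∧ a.2 < b.2)) := by
  unfold pvL
  rw [List.pairwise_flatMap]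
  constructor
  · intro i _
    refine List.Pairwise.map _ ?_ ((List.pairwise_lt_range).filter _)
    intro a b hab
    right
    exact ⟨rfl, by simpa using hab⟩
  · apply List.Pairwise.imp ?_ (List.pairwise_lt_range (n := R'))
    intro i1 i2 h12 x hx y hy
    simp only [List.mem_map] at hx hy
    obtain ⟨j1, _, rfl⟩ := hx
    obtain ⟨j2, _, rfl⟩ := hy
    left
    dsimp only
    exact_mod_cast h12

theorem pv_foldl_id {A B : Type} (l : List B) (acc : A) :
    l.foldl (fun acc _ => acc) acc = acc := by
  induction l generalizing acc with
  | nil => rfl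
  | cons y t ih => exact ih acc

-- ===== VERDICT (by name: the statement is the Claim_ definition above) =====
theorem VowelSquare_spec : Claim_equal_VowelSquare := by
  intro terms _hdom hpre
  unfold Spec_VowelSquare
  obtain ⟨hne, _hlen⟩ := hpre
  cases terms with
  | nil => exact absurd rfl hne
  | cons h t =>
  unfold VowelSquare VowelSquare_alt
  simp only [List.map_id', PySem.List.pyGet?_zero_cons, List.length_cons]
  have eR : ((t.length + 1 : Nat) : Int) - 1 = (t.length : Int) := by push_cast; ring
  rw [eR]
  cases hc : h.toList.length with
  | zero =>
    rw [show ((0 : Nat) : Int) - 1 = -1 from by norm_num]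
    rw [PySem.List.pyRange_one_eq_nil (by omega : (-1 : Int) ≤ 0)]
    simp only [List.foldl_nil, List.findSome?_nil]
    rw [pv_foldl_id]
    rfl
  | succ c =>
    rw [show ((c + 1 : Nat) : Int) - 1 = (c : Int) from by push_cast; ring,
      pv_L_eq (h :: t) t.length c]
    by_cases hL : pvL (h :: t) t.length c = []
    · -- no all-vowel square anywhere
      have hnohit : ∀ i j, i < t.length → j < c → pvHit (h :: t) i j = false := by
        intro i j hi hj
        by_contra hcon
        have hmem : ((i : Int), (j : Int)) ∈ pvL (h :: t) t.length c :=
          (pv_mem_pvL _ _ _ _).mpr ⟨i, j, hi, hj, by simpa using hcon, rfl⟩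
        rw [hL] at hmem
        simp at hmem
      rw [if_pos hL]
      have hB : (PySem.List.pyRange 0 (c : Int) 1).findSome? (fun j =>
          (PySem.List.pyRange 0 (t.length : Int) 1).findSome? (fun i =>
            if pvCell (h :: t) i j && pvCell (h :: t) (i+1) j && pvCell (h :: t) i (j+1)
                 && pvCell (h :: t) (i+1) (j+1)
            then some (PySem.Int.toStr i ++ "-" ++ PySem.Int.toStr j) else none)) = none := by
        rw [List.findSome?_eq_none_iff]
        intro x hx
        rw [PySem.List.pyRange_zero_natCast c] at hx
        obtain ⟨j, hj, rfl⟩ := List.mem_map.mp hx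
        rw [List.findSome?_eq_none_iff]
        intro y hy
        rw [PySem.List.pyRange_zero_natCast t.length] at hy
        obtain ⟨i, hi, rfl⟩ := List.mem_map.mp hy
        rw [pv_hitB_eq, hnohit i j (List.mem_range.mp hi) (List.mem_range.mp hj)]
        rfl
      rw [hB]
    · -- there is a hit: A takes the head of the stable sort, B the first column-major hit
      obtain ⟨m, hfold⟩ := pv_foldl_some (fun x : Int × Int => x.2) _ hL
      obtain ⟨L1, L2, hdec, hlt1, hle2⟩ := pv_firstMin_decomp _ _ m hfold
      have hmem : m ∈ pvL (h :: t) t.length c := by rw [hdec]; simp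
      obtain ⟨i0, j0, hi0, hj0, hhit0, hm⟩ := (pv_mem_pvL _ _ _ _).mp hmem
      -- the pairwise (row-major) order of L, restricted to the tail after m
      have hpw := pv_pairwise_pvL (h :: t) t.length c
      rw [hdec] at hpw
      have hpw2 : ∀ x ∈ L2, m.1 < x.1 ∨ (m.1 = x.1 ∧ m.2 < x.2) :=
        (List.pairwise_cons.mp (List.pairwise_append.mp hpw).2.1).1
      -- minimality of (j0, i0) in the (column, row) lexicographic order
      have hmin : ∀ i j, i < t.length → j < c → pvHit (h :: t) i j = true →
          j0 < j ∨ (j = j0 ∧ i0 ≤ i) := by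
        intro i j hi hj hhit
        have hx : ((i : Int), (j : Int)) ∈ pvL (h :: t) t.length c :=
          (pv_mem_pvL _ _ _ _).mpr ⟨i, j, hi, hj, hhit, rfl⟩
        rw [hdec] at hx
        rcases List.mem_append.mp hx with hx1 | hx2
        · have := hlt1 _ hx1
          rw [hm] at this
          simp only at this
          left; exact_mod_cast this
        · rcases List.mem_cons.mp hx2 with heq | hx2'
          · rw [hm] at heq
            have hji : j = j0 ∧ i = i0 := by
              constructor <;> [skip; skip] <;>
                · have := congrArg (fun p : Int × Int => p) heq
                  simp [Prod.ext_iff] at heq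
                  omega
            right; exact ⟨hji.1, le_of_eq hji.2.symm⟩
          · have hle := hle2 _ hx2'
            have hlex := hpw2 _ hx2'
            rw [hm] at hle hlex
            simp only at hle hlex
            rcases eq_or_lt_of_le hle with heq | hltj
            · right
              refine ⟨by exact_mod_cast heq.symm, ?_⟩
              rcases hlex with hfst | ⟨_, hsnd⟩
              · exact le_of_lt (by exact_mod_cast hfst)
              · rw [← heq] at hsnd
                exact absurd hsnd (lt_irrefl _)
            · left; exact_mod_cast hltj
      -- A's side: res[0] = m
      rw [if_neg hL]
      have hhead : (PySem.List.sorted (pvL (h :: t) t.length c) (fun x => x.2)).head?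
          = some m := by
        rw [pv_head_sorted]; exact hfold
      have hres : PySem.List.pyGetD (PySem.List.sorted (pvL (h :: t) t.length c)
          (fun x => x.2)) 0 ((0 : Int), (0 : Int)) = m := by
        rw [PySem.List.pyGetD_zero]
        cases hs : PySem.List.sorted (pvL (h :: t) t.length c) (fun x => x.2) with
        | nil => rw [hs] at hhead; simp at hhead
        | cons a tl =>
          rw [hs] at hhead
          simp only [List.head?_cons] at hhead
          simp [List.getD, Option.some.inj hhead]
      rw [hres, hm]
      -- B's side: the column-major scan stops exactly at (i0, j0)
      have hB : (PySem.List.pyRange 0 (c : Int) 1).findSome? (fun j =>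
          (PySem.List.pyRange 0 (t.length : Int) 1).findSome? (fun i =>
            if pvCell (h :: t) i j && pvCell (h :: t) (i+1) j && pvCell (h :: t) i (j+1)
                 && pvCell (h :: t) (i+1) (j+1)
            then some (PySem.Int.toStr i ++ "-" ++ PySem.Int.toStr j) else none))
          = some (PySem.Int.toStr (i0 : Int) ++ "-" ++ PySem.Int.toStr (j0 : Int)) := by
        rw [PySem.List.pyRange_zero_natCast c, List.findSome?_map]
        apply pv_findSome?_range _ _ c j0 hj0
        · intro k hk
          rw [Function.comp_apply, PySem.List.pyRange_zero_natCast t.length,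
            List.findSome?_map, List.findSome?_eq_none_iff]
          intro i hi
          rw [Function.comp_apply, pv_hitB_eq]
          have : pvHit (h :: t) i k = false := by
            by_contra hcon
            rcases hmin i k (List.mem_range.mp hi) (lt_trans hk hj0)
              (by simpa using hcon) with h1 | h2
            · omega
            · omega
          rw [this]; rfl
        · rw [Function.comp_apply, PySem.List.pyRange_zero_natCast t.length,
            List.findSome?_map]
          apply pv_findSome?_range _ _ t.length i0 hi0
          · intro k hk
            rw [Function.comp_apply, pv_hitB_eq]
            have : pvHit (h :: t) k j0 = false := by
              by_contra hcon
              rcases hmin k j0 (lt_trans hk hi0) hj0 (by simpa using hcon) with h1 | h2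
              · omega
              · omega
            rw [this]; rfl
          · rw [Function.comp_apply, pv_hitB_eq, hhit0]; rfl
      rw [hB]
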